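-- pv_equiv track=rewrite | github.com/NadiellySantos/backend-avaliacao-postural | app/main.py | reordenar_pontos
-- ===== SOURCE A (Python) =====
-- def reordenar_pontos(pontos):
--     grupos = {}
--     for p in pontos:
--         y_key = round(p[1] / 50)
--         if y_key not in grupos:
--             grupos[y_key] = []
--         grupos[y_key].append(p)
--
--     pontos_ordenados = []
--     for _, grupo in sorted(grupos.items()):
--         if len(grupo) == 2:
--             grupo = sorted(grupo, key=lambda x: x[0])
--             pontos_ordenados.extend(grupo)
--         else:
--             pontos_ordenados.extend(grupo)
--     return pontos_ordenados
-- ===== SOURCE B (Python) =====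
-- def reordenar_pontos(pontos):
--     chaves = sorted({round(p[1] / 50) for p in pontos})
--     resultado = []
--     for c in chaves:
--         grupo = [p for p in pontos if round(p[1] / 50) == c]
--         resultado += sorted(grupo, key=lambda x: x[0]) if len(grupo) == 2 else grupo
--     return resultado
-- ===== Notes on version B (the rewrite author's own statement) =====
-- stated objective: simpler
-- what changed: B drops the dict-accumulation pass entirely: it sorts the distinct rounded-y keys of the input and, per key, filters the points in order, instead of A's build-a-dict-of-lists then sort-the-items two-phase algorithm.
import Mathlib
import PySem

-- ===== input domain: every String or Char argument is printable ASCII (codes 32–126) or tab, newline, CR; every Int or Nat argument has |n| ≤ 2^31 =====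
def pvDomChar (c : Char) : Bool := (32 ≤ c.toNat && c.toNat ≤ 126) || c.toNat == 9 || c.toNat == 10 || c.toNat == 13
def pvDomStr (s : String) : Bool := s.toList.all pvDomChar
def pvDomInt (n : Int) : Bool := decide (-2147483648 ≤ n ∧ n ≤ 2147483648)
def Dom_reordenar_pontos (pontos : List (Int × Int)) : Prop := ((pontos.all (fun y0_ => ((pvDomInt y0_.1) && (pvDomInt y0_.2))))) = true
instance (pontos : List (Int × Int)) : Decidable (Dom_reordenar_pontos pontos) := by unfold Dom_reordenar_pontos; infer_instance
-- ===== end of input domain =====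

-- B replaces A's dict-of-lists accumulation by "sort the distinct keys, then filter per key" (simpler, same output).

-- round(y / 50): Python rounds the float y/50 to the nearest integer, ties to even.  Ported by hand:
-- exact on Dom, since for |y| ≤ 2^31 the double y/50 is exact at every tie (an odd multiple of 1/2)
-- and otherwise lies far closer to y/50 than y/50 is to any tie.
def pvRound50 (y : Int) : Int :=
  let m := PySem.Int.floordiv y 50
  if PySem.Int.mod y 50 = 25 then (if PySem.Int.mod m 2 = 0 then m else m + 1)
  else PySem.Int.floordiv (y + 25) 50

-- ===== PORT A =====
-- sorted(grupos.items()) compares (key, list) tuples, but dict keys are distinct, so the second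
-- component is never compared: sorting by the key alone (fun pr => pr.1) is exact here.
def reordenar_pontos (pontos : List (Int × Int)) : List (Int × Int) :=
  let grupos : PySem.Dict Int (List (Int × Int)) :=
    pontos.foldl (fun d p =>
      let yk := pvRound50 p.2
      let d1 := if d.contains yk then d else d.insert yk []
      d1.insert yk (d1.getD yk [] ++ [p])) PySem.Dict.empty
  (PySem.List.sorted grupos.items (fun pr => pr.1) false).foldl
    (fun acc pr =>
      if pr.2.length = 2 then acc ++ PySem.List.sorted pr.2 (fun x => x.1) false
      else acc ++ pr.2) []

-- ===== PORT B =====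
def reordenar_pontos_alt (pontos : List (Int × Int)) : List (Int × Int) :=
  let chaves := PySem.List.sorted (PySem.Set.ofList (pontos.map (fun p => pvRound50 p.2))) (fun c => c) false
  chaves.foldl (fun resultado c =>
    let grupo := pontos.filter (fun p => pvRound50 p.2 == c)
    resultado ++ (if grupo.length = 2 then PySem.List.sorted grupo (fun x => x.1) false else grupo)) []

-- ===== PRECONDITION & SPEC =====
def Spec_reordenar_pontos (pontos : List (Int × Int)) (out : List (Int × Int)) : Prop := out = reordenar_pontos_alt pontos
instance (pontos : List (Int × Int)) (out : List (Int × Int)) : Decidable (Spec_reordenar_pontos pontos out) := by unfold Spec_reordenar_pontos; infer_instance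

-- ===== CLAIM (what is proved, stated in full; the proofs are below) =====
def Claim_equal_reordenar_pontos : Prop := ∀ (pontos : List (Int × Int)), Dom_reordenar_pontos pontos → Spec_reordenar_pontos pontos (reordenar_pontos pontos)

-- ===== LEMMAS AND PROOFS =====

-- the per-group transform both programs apply
def pvTr (g : List (Int × Int)) : List (Int × Int) :=
  if g.length = 2 then PySem.List.sorted g (fun x => x.1) false else g

-- one step of A's grouping loop preserves the items characterisation
theorem step_items (k : Int × Int → Int) (xs : List (Int × Int)) (p : Int × Int)
    (D : PySem.Dict Int (List (Int × Int)))
    (hI : D.items = (PySem.Set.ofList (xs.map k)).map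
        (fun y => (y, xs.filter (fun q => k q == y)))) :
    ((if D.contains (k p) then D else D.insert (k p) ([] : List (Int × Int))).insert (k p)
        ((if D.contains (k p) then D else D.insert (k p) ([] : List (Int × Int))).getD (k p) [] ++ [p])).items
    = (PySem.Set.ofList ((xs ++ [p]).map k)).map
        (fun y => (y, (xs ++ [p]).filter (fun q => k q == y))) := by
  set S := PySem.Set.ofList (xs.map k) with hSdef
  have hkeys : D.keys = S := by
    simp only [PySem.Dict.keys, hI, List.map_map]
    exact List.map_id _
  have hnd : D.keys.Nodup := by rw [hkeys]; exact PySem.Set.nodup_ofList _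
  have hcont : D.contains (k p) = decide (k p ∈ S) := by
    rw [PySem.Dict.contains_eq_decide_mem_keys, hkeys]
  have hRS : PySem.Set.ofList ((xs ++ [p]).map k) = PySem.Set.add S (k p) := by
    rw [List.map_append, PySem.Set.ofList_append]
    rfl
  have hfiltnew : ∀ y, (xs ++ [p]).filter (fun q => k q == y)
      = xs.filter (fun q => k q == y) ++ (if k p = y then [p] else []) := by
    intro y
    rw [List.filter_append]
    by_cases h : k p = y
    · simp [h]
    · simp [h]
  by_cases hmem : k p ∈ S
  · have hc : D.contains (k p) = true := by simp [hcont, hmem]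
    rw [if_pos hc]
    have hmemI : (k p, xs.filter (fun q => k q == k p)) ∈ D.items := by
      rw [hI]; exact List.mem_map.2 ⟨k p, hmem, rfl⟩
    have hgd : D.getD (k p) [] = xs.filter (fun q => k q == k p) :=
      PySem.Dict.getD_of_mem_items D hmemI hnd []
    rw [PySem.Dict.items_insert_of_contains D _ hc, hI, hRS, List.map_map]
    have hadd : PySem.Set.add S (k p) = S := by simp [PySem.Set.add, hmem]
    rw [hadd]
    refine List.map_congr_left (fun y hy => ?_)
    by_cases h : y = k p
    · subst h; simp [hgd, hfiltnew]
    · simp [Function.comp, h, Ne.symm h, hfiltnew y]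
  · have hc : D.contains (k p) = false := by simp [hcont, hmem]
    rw [if_neg (by simp [hc])]
    have hne : ∀ a ∈ S, a ≠ k p := fun a ha h => hmem (h ▸ ha)
    have hitems1 : (D.insert (k p) ([] : List (Int × Int))).items = D.items ++ [(k p, [])] :=
      PySem.Dict.items_insert_of_not_contains D _ hc
    have hkeys1 : (D.insert (k p) ([] : List (Int × Int))).keys = S ++ [k p] := by
      simp [PySem.Dict.keys, hitems1, ← hkeys]
    have hnd1 : (D.insert (k p) ([] : List (Int × Int))).keys.Nodup := by
      rw [hkeys1]
      simp only [List.nodup_append, List.nodup_singleton, true_and]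
      exact ⟨hkeys ▸ hnd, by simpa [List.disjoint_singleton] using hne⟩
    have hgd : (D.insert (k p) ([] : List (Int × Int))).getD (k p) [] = [] :=
      PySem.Dict.getD_of_mem_items _ (by rw [hitems1]; simp) hnd1 []
    have hc1 : (D.insert (k p) ([] : List (Int × Int))).contains (k p) = true := by
      rw [PySem.Dict.contains_eq_decide_mem_keys, hkeys1]; simp
    rw [PySem.Dict.items_insert_of_contains _ _ hc1, hgd, hitems1, hRS]
    have hadd : PySem.Set.add S (k p) = S ++ [k p] := by
      simp only [PySem.Set.add]
      rw [if_neg (by simpa using hmem)]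
    have hfilt0 : xs.filter (fun q => k q == k p) = [] := by
      rw [List.filter_eq_nil_iff]
      intro a ha
      simp only [beq_iff_eq]
      exact fun h => hmem ((PySem.Set.mem_ofList _ _).2 (h ▸ List.mem_map_of_mem ha))
    rw [hadd, List.map_append, List.map_append, hI, List.map_map]
    refine congrArg₂ (· ++ ·) ?_ ?_
    · refine List.map_congr_left (fun y hy => ?_)
      have h := hne y hy
      simp [Function.comp, h, Ne.symm h, hfiltnew y]
    · simp [hfiltnew, hfilt0]

-- A's dict after the first loop: items = distinct keys in first-occurrence order, each paired
-- with the ordered sublist of pontos carrying that key.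
theorem grupos_items (xs : List (Int × Int)) :
    (xs.foldl (fun d p =>
      let yk := pvRound50 p.2
      let d1 := if d.contains yk then d else d.insert yk ([] : List (Int × Int))
      d1.insert yk (d1.getD yk [] ++ [p])) PySem.Dict.empty).items
    = (PySem.Set.ofList (xs.map (fun p => pvRound50 p.2))).map
        (fun y => (y, xs.filter (fun p => pvRound50 p.2 == y))) := by
  induction xs using List.reverseRecOn with
  | nil => rfl
  | append_singleton xs p ih =>
    simp only [List.foldl_append, List.foldl_cons, List.foldl_nil]
    exact step_items (fun q => pvRound50 q.2) xs p _ ih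

-- A's output loop is an append-fold over pvTr of the second components
theorem foldA (l : List (Int × List (Int × Int))) (acc : List (Int × Int)) :
    l.foldl (fun acc pr =>
      if pr.2.length = 2 then acc ++ PySem.List.sorted pr.2 (fun x => x.1) false
      else acc ++ pr.2) acc = acc ++ l.flatMap (fun pr => pvTr pr.2) := by
  induction l generalizing acc with
  | nil => simp
  | cons h t ih => simp [List.foldl_cons, ih, pvTr]; split <;> simp

-- sorting A's items by key = the sorted distinct keys, each paired with its filtered group
theorem sorted_items (pontos : List (Int × Int)) :
    PySem.List.sorted
      ((pontos.foldl (fun d p =>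
        let yk := pvRound50 p.2
        let d1 := if d.contains yk then d else d.insert yk ([] : List (Int × Int))
        d1.insert yk (d1.getD yk [] ++ [p])) PySem.Dict.empty).items) (fun pr => pr.1) false
    = (PySem.List.sorted (PySem.Set.ofList (pontos.map (fun p => pvRound50 p.2))) (fun c => c) false).map
        (fun y => (y, pontos.filter (fun p => pvRound50 p.2 == y))) := by
  apply PySem.List.sorted_eq_of_perm_of_pairwise_lt
  · refine ((PySem.List.sorted_perm _ _ _).map _).trans ?_
    rw [grupos_items]
  · rw [List.pairwise_map]
    exact PySem.List.sorted_ofList_pairwise_lt _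

-- ===== VERDICT (by name: the statement is the Claim_ definition above) =====
theorem reordenar_pontos_spec : Claim_equal_reordenar_pontos := by
  intro pontos _
  unfold Spec_reordenar_pontos reordenar_pontos reordenar_pontos_alt
  simp only [sorted_items, foldA, PySem.List.foldl_append_eq_flatMap, List.flatMap_map, List.nil_append]
  simp [pvTr]
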